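-- pv_equiv track=rewrite | github.com/Noxzxz/algoritmos-python | LabProgramacao/Prova2Selmini/q1.py | VerificarRisada
-- ===== SOURCE A (Python) =====
-- def VerificarRisada(risada):
--
--     vogais = ["a","e","i","o","u"]
--     IdaVog, esqVog = "",""
--
--     #selecionar apenas vogais da esquerda pra direita
--     for i in risada:
--         if i.lower() in vogais:
--             IdaVog+= i.lower()
--
--     j= len(risada)-1
--     #inverter string
--     while j >= 0:
--         esqVog += risada[j].lower()
--         j-=1
--
--     #selecionar apenas vogais da direita para a esquerda
--     aux=""
--     for i in esqVog:
--         if i.lower() in vogais: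
--             aux+= i
--
--     #Compara strings
--     if aux == IdaVog:
--         return True
--     else:
--         return False
-- ===== SOURCE B (Python) =====
-- def VerificarRisada(risada):
--     vogais = ["a", "e", "i", "o", "u"]
--     v = [c for c in risada.lower() if c in vogais]
--     i, j = 0, len(v) - 1
--     while i < j:
--         if v[i] != v[j]:
--             return False
--         i, j = i + 1, j - 1
--     return True
-- ===== Notes on version B (the rewrite author's own statement) =====
-- stated objective: simpler
-- what changed: B lowercases and extracts the vowels in one comprehension and checks the palindrome in place with a two-pointer loop, instead of A's three accumulation passes (vowel pass, manual character-by-character string reversal, second vowel pass) followed by a string comparison.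
import Mathlib
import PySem

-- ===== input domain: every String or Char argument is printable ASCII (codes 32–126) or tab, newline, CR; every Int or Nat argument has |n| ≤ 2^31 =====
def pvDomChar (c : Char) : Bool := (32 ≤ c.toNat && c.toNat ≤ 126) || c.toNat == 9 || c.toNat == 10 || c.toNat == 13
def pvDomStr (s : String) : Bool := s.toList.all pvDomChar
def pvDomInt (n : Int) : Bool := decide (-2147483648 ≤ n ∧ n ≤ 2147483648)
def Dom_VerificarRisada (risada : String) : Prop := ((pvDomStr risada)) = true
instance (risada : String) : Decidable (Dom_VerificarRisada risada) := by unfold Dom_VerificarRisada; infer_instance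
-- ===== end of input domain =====

-- B extracts the lowercased vowels in one comprehension and checks the palindrome in place with a
-- two-pointer loop, instead of A's three accumulation passes plus a final string comparison (simpler).

-- ===== PORT A =====
def VerificarRisada (risada : String) : Bool :=
  let vogais : List Char := ['a', 'e', 'i', 'o', 'u']
  let cs := risada.toList
  -- for i in risada: if i.lower() in vogais: IdaVog += i.lower()
  let idaVog := cs.foldl (fun acc i =>
      if vogais.contains (PySem.Chars.lowerChar i) then acc ++ [PySem.Chars.lowerChar i] else acc)
      ([] : List Char)
  -- while j >= 0: esqVog += risada[j].lower(); j -= 1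
  -- (the index j runs len-1, …, 0, always in range, so pyGetD's default is never read)
  let esqVog := (PySem.List.pyRange ((cs.length : Int) - 1) (-1) (-1)).foldl (fun acc j =>
      acc ++ [PySem.Chars.lowerChar (PySem.List.pyGetD cs j ' ')]) ([] : List Char)
  -- for i in esqVog: if i.lower() in vogais: aux += i
  let aux := esqVog.foldl (fun acc i =>
      if vogais.contains (PySem.Chars.lowerChar i) then acc ++ [i] else acc) ([] : List Char)
  aux == idaVog

-- ===== PORT B =====
-- the while loop of Source B: two pointers i, j into the fixed vowel list v
-- (0 ≤ i < j < v.length throughout, so pyGetD's default is never read)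
def twoPtrLoop (v : List Char) (i j : Int) : Bool :=
  if i < j then
    if PySem.List.pyGetD v i ' ' ≠ PySem.List.pyGetD v j ' ' then false
    else twoPtrLoop v (i + 1) (j - 1)
  else true
termination_by (j - i).toNat
decreasing_by omega

def VerificarRisada_alt (risada : String) : Bool :=
  let vogais : List Char := ['a', 'e', 'i', 'o', 'u']
  -- v = [c for c in risada.lower() if c in vogais]
  let v := (PySem.Chars.lower risada.toList).filter (fun c => vogais.contains c)
  twoPtrLoop v 0 ((v.length : Int) - 1)

-- ===== PRECONDITION & SPEC =====
def Spec_VerificarRisada (risada : String) (out : Bool) : Prop := out = VerificarRisada_alt risada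
instance (risada : String) (out : Bool) : Decidable (Spec_VerificarRisada risada out) := by unfold Spec_VerificarRisada; infer_instance

-- ===== CLAIM (what is proved, stated in full; the proofs are below) =====
def Claim_equal_VerificarRisada : Prop := ∀ (risada : String), Dom_VerificarRisada risada → Spec_VerificarRisada risada (VerificarRisada risada)

-- ===== LEMMAS AND PROOFS =====

-- ASCII lowering is idempotent (a lowered char is never an upper-case letter)
lemma lowerChar_idem (c : Char) :
    PySem.Chars.lowerChar (PySem.Chars.lowerChar c) = PySem.Chars.lowerChar c := by
  unfold PySem.Chars.lowerChar PySem.Chars.isupper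
  split
  · next h =>
    simp only [decide_eq_true_eq, Bool.and_eq_true] at h
    have hle : c.toNat ≤ 90 := Fin.mk_le_mk.mp h.2
    have hge : 65 ≤ c.toNat := Fin.mk_le_mk.mp h.1
    have hv : (c.toNat + 32).isValidChar := by constructor; omega
    have htn : (Char.ofNat (c.toNat + 32)).toNat = c.toNat + 32 := by
      rw [Char.ofNat, dif_pos hv]; rfl
    rw [if_neg]
    simp only [decide_eq_true_eq, Bool.and_eq_true, not_and]
    intro _ h1
    have hZ : (Char.ofNat (c.toNat + 32)).toNat ≤ 90 := Fin.mk_le_mk.mp h1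
    omega
  · rfl

lemma pyGetD_getElem (v : List Char) (k : Int) (h0 : 0 ≤ k) (h1 : k.toNat < v.length) :
    PySem.List.pyGetD v k ' ' = v[k.toNat] := by
  rw [PySem.List.pyGetD_of_nonneg _ _ h0, List.getD_eq_getElem _ _ h1]

-- the two-pointer loop decides pointwise symmetry of the window [i, j]
lemma twoPtrLoop_iff : ∀ (n : Nat) (v : List Char) (i j : Int), (j - i).toNat = n →
    (twoPtrLoop v i j = true ↔
      ∀ k : Int, i ≤ k → k < j →
        PySem.List.pyGetD v k ' ' = PySem.List.pyGetD v (i + j - k) ' ') := by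
  intro n
  induction n using Nat.strong_induction_on with
  | _ n IH =>
    intro v i j hn
    unfold twoPtrLoop
    by_cases hij : i < j
    · rw [if_pos hij]
      by_cases heq : PySem.List.pyGetD v i ' ' = PySem.List.pyGetD v j ' '
      · rw [if_neg (by simpa using heq)]
        rw [IH ((j - 1) - (i + 1)).toNat (by omega) v (i + 1) (j - 1) rfl]
        constructor
        · intro h k hk1 hk2
          by_cases hki : k = i
          · subst hki
            rw [show k + j - k = j by ring]
            exact heq
          · by_cases hkj : k = j - 1
            · subst hkj
              rw [show i + j - (j - 1) = i + 1 by ring]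
              by_cases h2 : i + 1 < j - 1
              · have := h (i + 1) le_rfl h2
                rw [show (i + 1) + (j - 1) - (i + 1) = j - 1 by ring] at this
                exact this.symm
              · rw [show j - 1 = i + 1 by omega]
            · have := h k (by omega) (by omega)
              rwa [show (i + 1) + (j - 1) - k = i + j - k by ring] at this
        · intro h k hk1 hk2
          have := h k (by omega) (by omega)
          rwa [show i + 1 + (j - 1) - k = i + j - k by ring]
      · rw [if_pos (by simpa using heq)]
        constructor
        · intro hfalse
          exact absurd hfalse Bool.false_ne_true
        · intro h
          exfalso
          apply heq
          have := h i le_rfl hij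
          rwa [show i + j - i = j by ring] at this
    · rw [if_neg hij]
      simp only [true_iff]
      intro k hk1 hk2
      omega

-- the symmetry condition over the whole list is exactly "the list equals its reverse"
lemma symm_iff_reverse_eq (v : List Char) :
    (∀ k : Int, 0 ≤ k → k < (v.length : Int) - 1 →
        PySem.List.pyGetD v k ' ' = PySem.List.pyGetD v (0 + ((v.length : Int) - 1) - k) ' ')
      ↔ v.reverse = v := by
  constructor
  · intro h
    apply List.ext_getElem (by simp)
    intro m h1 h2
    rw [List.getElem_reverse]
    by_cases hm : m < v.length - 1
    · have := h m (by omega) (by omega)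
      rw [pyGetD_getElem v m (by omega) (by omega)] at this
      rw [show (0 + ((v.length : Int) - 1) - m) = ((v.length : Int) - 1 - m) by ring] at this
      rw [pyGetD_getElem v _ (by omega) (by omega)] at this
      simp only [Int.toNat_natCast] at this
      have harg : ((v.length : Int) - 1 - (m : Int)).toNat = v.length - 1 - m := by omega
      simp only [harg] at this
      exact this.symm
    · -- m = v.length - 1 (v nonempty here)
      have hm' : m = v.length - 1 := by omega
      by_cases h1v : v.length ≤ 1
      · have : m = 0 := by omega
        subst this
        congr 1
        omega
      · have h0 := h 0 le_rfl (by omega)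
        rw [pyGetD_getElem v 0 le_rfl (by omega)] at h0
        rw [show (0 + ((v.length : Int) - 1) - 0) = ((v.length : Int) - 1) by ring] at h0
        rw [pyGetD_getElem v _ (by omega) (by omega)] at h0
        have harg : ((v.length : Int) - 1).toNat = v.length - 1 := by omega
        simp only [harg, Int.toNat_zero] at h0
        subst hm'
        simp only [Nat.sub_self]
        exact h0
  · intro h k hk0 hk1
    have hkl : k.toNat < v.length := by omega
    rw [pyGetD_getElem v k hk0 hkl]
    rw [show (0 + ((v.length : Int) - 1) - k) = ((v.length : Int) - 1 - k) by ring]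
    rw [pyGetD_getElem v _ (by omega) (by omega)]
    have harg : ((v.length : Int) - 1 - k).toNat = v.length - 1 - k.toNat := by omega
    simp only [harg]
    have hrev : v.reverse[k.toNat]'(by simpa using hkl)
        = v[v.length - 1 - k.toNat]'(by omega) := List.getElem_reverse _
    have hrw : v.reverse[k.toNat]'(by simpa using hkl) = v[k.toNat]'hkl :=
      List.getElem_of_eq h _
    rw [← hrev, hrw]

-- ===== VERDICT (by name: the statement is the Claim_ definition above) =====
theorem VerificarRisada_spec : Claim_equal_VerificarRisada := by
  intro risada _
  unfold Spec_VerificarRisada VerificarRisada VerificarRisada_alt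
  simp only []
  set cs := risada.toList with hcs
  set vogais : List Char := ['a', 'e', 'i', 'o', 'u'] with hvog
  set V := (PySem.Chars.lower cs).filter (fun c => vogais.contains c) with hV
  -- A's first pass builds V
  have h1 : cs.foldl (fun acc i =>
      if vogais.contains (PySem.Chars.lowerChar i) then acc ++ [PySem.Chars.lowerChar i] else acc)
      ([] : List Char) = V := by
    rw [PySem.List.foldl_append_if (fun i => vogais.contains (PySem.Chars.lowerChar i))
      PySem.Chars.lowerChar cs []]
    rw [hV, PySem.Chars.lower, List.filter_map, List.nil_append]
    rfl
  -- A's manual reversal builds the lowercased reverse of cs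
  have h2 : (PySem.List.pyRange ((cs.length : Int) - 1) (-1) (-1)).foldl (fun acc j =>
      acc ++ [PySem.Chars.lowerChar (PySem.List.pyGetD cs j ' ')]) ([] : List Char)
      = (cs.map PySem.Chars.lowerChar).reverse := by
    have hr : PySem.List.pyRange ((cs.length : Int) - 1) (-1) (-1)
        = (PySem.List.pyRange 0 (cs.length : Int)).reverse := by
      rw [PySem.List.pyRange_neg_one_eq_reverse]
      norm_num
    rw [hr, PySem.List.foldl_append_singleton_eq_map]
    rw [List.map_reverse, List.nil_append]
    congr 1
    rw [show (fun j => PySem.Chars.lowerChar (PySem.List.pyGetD cs j ' '))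
        = (PySem.Chars.lowerChar ∘ fun j => PySem.List.pyGetD cs j ' ') from rfl, ← List.map_map]
    congr 1
    exact PySem.List.map_pyGetD_pyRange_zero cs ' '
  -- A's third pass builds V.reverse
  have h3 : ((cs.map PySem.Chars.lowerChar).reverse).foldl (fun acc i =>
      if vogais.contains (PySem.Chars.lowerChar i) then acc ++ [i] else acc) ([] : List Char)
      = V.reverse := by
    rw [PySem.List.foldl_append_if (fun i => vogais.contains (PySem.Chars.lowerChar i))
      (fun i => i) _ []]
    rw [List.map_id', List.nil_append, List.filter_reverse]
    congr 1
    rw [hV, PySem.Chars.lower]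
    apply List.filter_congr
    intro x hx
    obtain ⟨y, _, rfl⟩ := List.mem_map.mp hx
    rw [lowerChar_idem]
  rw [h1, h2, h3]
  -- B's two-pointer loop decides V.reverse = V
  rw [Bool.eq_iff_iff, beq_iff_eq]
  rw [twoPtrLoop_iff (((V.length : Int) - 1) - 0).toNat V 0 ((V.length : Int) - 1) rfl]
  exact (symm_iff_reverse_eq V).symm
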